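-- pv_equiv track=rewrite | github.com/Tay-Son/GH_CT | algorithm/BOJ 02727.py | rec_
-- ===== SOURCE A (Python) =====
-- def rec_(num_, depth_):
--     lst_ret = []
--     if num_ == 1:
--         lst_ret += [(depth_, 0)]
--     elif not num_ % 2:
--         lst_ret += rec_(num_ // 2, depth_ + 1)
--     else:
--         mag_ = 19
--         while num_ < 3 ** mag_:
--             mag_ -= 1
--         lst_ret += [(depth_, mag_)]
--         if 3 ** mag_ < num_:
--             lst_ret += rec_(num_ - 3 ** mag_, depth_)
--     return lst_ret
-- ===== SOURCE B (Python) =====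
-- def rec_(num_, depth_):
--     # Iterative, phase-batched version: each outer iteration strips ALL factors
--     # of 2 at once, then does one power-of-3 step (magnitude found by an upward
--     # scan); a result accumulator replaces A's tail recursion.
--     out = []
--     while True:
--         while num_ % 2 == 0:
--             num_ //= 2
--             depth_ += 1
--         if num_ == 1:
--             out.append((depth_, 0))
--             return out
--         m = 0
--         while 3 ** (m + 1) <= num_:
--             m += 1
--         out.append((depth_, m))
--         if num_ == 3 ** m:
--             return out
--         num_ -= 3 ** m
-- ===== Notes on version B (the rewrite author's own statement) =====
-- stated objective: alternative
-- what changed: Replaced A's one-step-per-call tail recursion by an iterative loop with a result accumulator whose every iteration batches ALL halvings at once before one power-of-3 step, with the magnitude found by an upward scan maintaining the exponent instead of A's downward scan from 19.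
import Mathlib
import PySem

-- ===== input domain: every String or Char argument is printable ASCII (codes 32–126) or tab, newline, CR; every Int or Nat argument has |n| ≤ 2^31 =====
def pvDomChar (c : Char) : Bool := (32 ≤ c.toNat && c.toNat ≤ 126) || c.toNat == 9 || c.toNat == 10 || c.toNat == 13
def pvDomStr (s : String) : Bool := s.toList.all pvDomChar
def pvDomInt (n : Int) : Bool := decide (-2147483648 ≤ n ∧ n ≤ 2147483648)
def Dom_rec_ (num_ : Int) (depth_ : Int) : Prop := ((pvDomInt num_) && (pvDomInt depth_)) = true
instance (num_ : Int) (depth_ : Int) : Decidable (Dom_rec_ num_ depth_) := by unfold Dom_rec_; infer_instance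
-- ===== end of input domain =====

-- B replaces A's one-step-per-call tail recursion by an iterative loop with a result
-- accumulator whose each iteration batches ALL halvings at once and then performs one
-- power-of-3 step, the magnitude found by an upward scan (objective: alternative).

-- ===== PORT A =====
-- A's downward scan: mag_ = 19; while num_ < 3 ** mag_: mag_ -= 1   (stops at 0 at the latest)
def magDownA (num : Int) : Nat → Nat
  | 0 => 0
  | m + 1 => if num < 3 ^ (m + 1) then magDownA num m else m + 1

-- A's recursion, structural on a fuel counter; num_ strictly decreases at every step, so
-- fuel num_.toNat + 1 (below) is a pure totality guard, never exhausted when 1 ≤ num_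
def recAF : Nat → Int → Int → List (Int × Int)
  | 0, _, _ => []
  | f + 1, num, depth =>
    if num = 1 then [(depth, 0)]
    else if PySem.Int.mod num 2 = 0 then recAF f (PySem.Int.floordiv num 2) (depth + 1)
    else
      let mag := magDownA num 19
      (depth, (mag : Int)) :: (if (3 : Int) ^ mag < num then recAF f (num - 3 ^ mag) depth else [])

def rec_ (num_ : Int) (depth_ : Int) : List (Int × Int) := recAF (num_.toNat + 1) num_ depth_

-- ===== PORT B =====
-- B's inner halving loop: while num % 2 == 0: num //= 2; depth += 1
-- returns (odd part, number of halvings); fuel 64 is a totality guard only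
def strip2 : Nat → Int → Int → Int × Int
  | 0, n, k => (n, k)
  | f + 1, n, k =>
      if PySem.Int.mod n 2 = 0 then strip2 f (PySem.Int.floordiv n 2) (k + 1) else (n, k)

-- B's upward scan: m = 0; while 3 ** (m + 1) <= n: m += 1   (fuel 32 is a totality guard)
def log3B : Nat → Int → Nat → Nat
  | 0, _, m => m
  | f + 1, n, m => if (3 : Int) ^ (m + 1) ≤ n then log3B f n (m + 1) else m

-- B's outer while-True loop with the result accumulator; each iteration strictly
-- decreases num_, so fuel num_.toNat + 1 (below) is a pure totality guard
def loopBF : Nat → Int → Int → List (Int × Int) → List (Int × Int)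
  | 0, _, _, out => out
  | f + 1, num, depth, out =>
    let p := strip2 64 num 0
    let n := p.1
    let d := depth + p.2
    if n = 1 then out ++ [(d, 0)]
    else
      let m := log3B 32 n 0
      let out' := out ++ [(d, (m : Int))]
      if n = (3 : Int) ^ m then out' else loopBF f (n - 3 ^ m) d out'

def rec__alt (num_ : Int) (depth_ : Int) : List (Int × Int) := loopBF (num_.toNat + 1) num_ depth_ []

-- ===== PRECONDITION & SPEC =====
-- Pre_ excludes num_ ≤ 0: there Python A never returns (num_ = 0 recurses into itself
-- until RecursionError; num_ < 0 makes the mag_ scan loop forever through float powers).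
def Pre_rec_ (num_ : Int) (depth_ : Int) : Prop := 1 ≤ num_
instance (num_ : Int) (depth_ : Int) : Decidable (Pre_rec_ num_ depth_) := by unfold Pre_rec_; infer_instance
def pvWitness_rec_ : Int × Int := (27, 0)

def Spec_rec_ (num_ : Int) (depth_ : Int) (out : List (Int × Int)) : Prop := out = rec__alt num_ depth_
instance (num_ : Int) (depth_ : Int) (out : List (Int × Int)) : Decidable (Spec_rec_ num_ depth_ out) := by unfold Spec_rec_; infer_instance

-- ===== CLAIM (what is proved, stated in full; the proofs are below) =====
def Claim_equal_rec_ : Prop := ∀ (num_ : Int) (depth_ : Int), Dom_rec_ num_ depth_ → Pre_rec_ num_ depth_ → Spec_rec_ num_ depth_ (rec_ num_ depth_)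

-- ===== LEMMAS AND PROOFS =====

-- one-step unfolding of the fueled definitions, for rewriting at fuel `t + 1`
theorem recAF_succ (f : Nat) (num depth : Int) :
    recAF (f + 1) num depth =
      if num = 1 then [(depth, 0)]
      else if PySem.Int.mod num 2 = 0 then recAF f (PySem.Int.floordiv num 2) (depth + 1)
      else
        (depth, (magDownA num 19 : Int)) ::
          (if (3 : Int) ^ magDownA num 19 < num then recAF f (num - 3 ^ magDownA num 19) depth else []) := rfl

theorem loopBF_succ (f : Nat) (num depth : Int) (out : List (Int × Int)) :
    loopBF (f + 1) num depth out =
      if (strip2 64 num 0).1 = 1 then out ++ [(depth + (strip2 64 num 0).2, 0)]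
      else if (strip2 64 num 0).1 = (3 : Int) ^ log3B 32 (strip2 64 num 0).1 0 then
        out ++ [(depth + (strip2 64 num 0).2, (log3B 32 (strip2 64 num 0).1 0 : Int))]
      else
        loopBF f ((strip2 64 num 0).1 - 3 ^ log3B 32 (strip2 64 num 0).1 0)
          (depth + (strip2 64 num 0).2)
          (out ++ [(depth + (strip2 64 num 0).2, (log3B 32 (strip2 64 num 0).1 0 : Int))]) := rfl

-- any fuel above num.toNat gives the same value of A's recursion (num strictly decreases)
theorem recAF_stable : ∀ (f f' : Nat) (num depth : Int), 1 ≤ num →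
    num.toNat < f → num.toNat < f' → recAF f num depth = recAF f' num depth := by
  intro f
  induction f with
  | zero => intro f' num depth h1 h2 _; omega
  | succ f ih =>
    intro f' num depth h1 h2 h3
    cases f' with
    | zero => omega
    | succ f' =>
      rw [recAF_succ, recAF_succ]
      by_cases hone : num = 1
      · rw [if_pos hone, if_pos hone]
      · rw [if_neg hone, if_neg hone]
        by_cases he : PySem.Int.mod num 2 = 0
        · rw [if_pos he, if_pos he]
          have h2' : num % 2 = 0 := by
            have := PySem.Int.mod_eq_emod_of_pos (a := num) (b := 2) (by norm_num)
            omega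
          have hq : PySem.Int.floordiv num 2 = num / 2 :=
            PySem.Int.floordiv_eq_ediv_of_pos (by norm_num)
          rw [hq]
          exact ih f' (num / 2) (depth + 1) (by omega) (by omega) (by omega)
        · rw [if_neg he, if_neg he]
          by_cases hlt : (3 : Int) ^ magDownA num 19 < num
          · rw [if_pos hlt, if_pos hlt]
            have hp1 : (1 : Int) ≤ 3 ^ magDownA num 19 := one_le_pow₀ (by norm_num)
            rw [ih f' (num - 3 ^ magDownA num 19) depth (by omega) (by omega) (by omega)]
          · rw [if_neg hlt, if_neg hlt]

-- A's result at the canonical fuel num.toNat + 1 (the proofs' normal form)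
theorem recAF_ref (f : Nat) (num depth : Int) (h1 : 1 ≤ num) (h2 : num.toNat < f) :
    recAF f num depth = recAF (num.toNat + 1) num depth :=
  recAF_stable f (num.toNat + 1) num depth h1 h2 (by omega)

-- A's downward scan returns the largest k ≤ m with 3^k ≤ num (given 1 ≤ num)
theorem magDownA_spec (num : Int) (h1 : 1 ≤ num) :
    ∀ m : Nat, (3 : Int) ^ magDownA num m ≤ num ∧ magDownA num m ≤ m ∧
      (num < 3 ^ (magDownA num m + 1) ∨ magDownA num m = m) := by
  intro m
  induction m with
  | zero => simp [magDownA]; omega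
  | succ m ih =>
    unfold magDownA
    split
    · rename_i hlt
      refine ⟨ih.1, by omega, ?_⟩
      rcases ih.2.2 with h | h
      · exact Or.inl h
      · exact Or.inl (by rw [h]; exact hlt)
    · rename_i hge
      exact ⟨by omega, le_refl _, Or.inr rfl⟩

-- B's upward scan brackets n between consecutive powers of 3 (given enough fuel)
theorem log3B_spec : ∀ (f : Nat) (n : Int) (m : Nat),
    (3 : Int) ^ m ≤ n → n < 3 ^ (m + f + 1) →
    (3 : Int) ^ log3B f n m ≤ n ∧ n < 3 ^ (log3B f n m + 1) := by
  intro f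
  induction f with
  | zero =>
    intro n m hlo hhi
    simpa [log3B] using ⟨hlo, hhi⟩
  | succ f ih =>
    intro n m hlo hhi
    unfold log3B
    split
    · rename_i hle
      exact ih n (m + 1) hle (by have : m + 1 + f + 1 = m + (f + 1) + 1 := by omega
                                 rw [this]; exact hhi)
    · rename_i hgt
      exact ⟨hlo, by omega⟩

-- the two scans agree for 1 ≤ n < 3^20
theorem mag_eq (n : Int) (h1 : 1 ≤ n) (h2 : n < 3 ^ 20) :
    log3B 32 n 0 = magDownA n 19 := by
  have hd := magDownA_spec n h1 19
  have hu := log3B_spec 32 n 0 (by simpa using h1) (lt_of_lt_of_le h2 (by norm_num))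
  set u := log3B 32 n 0 with hu'
  set d := magDownA n 19 with hd'
  have hdub : n < 3 ^ (d + 1) := by
    rcases hd.2.2 with h | h
    · exact h
    · rw [h]; exact h2
  by_contra hne
  rcases Nat.lt_or_ge u d with h | h
  · have : (3 : Int) ^ (u + 1) ≤ 3 ^ d := pow_le_pow_right₀ (by norm_num) (by omega)
    omega
  · have hud : d < u := by omega
    have : (3 : Int) ^ (d + 1) ≤ 3 ^ u := pow_le_pow_right₀ (by norm_num) (by omega)
    omega

-- strip2 computes A's halving phase: A's recursion at n with counter k reaches the odd
-- part n' with counter k', and n' is odd, positive and ≤ n (strip2 fuel s with n < 2^s)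
theorem strip2_recA : ∀ (s : Nat) (n k d : Int), 1 ≤ n → n < 2 ^ s →
    recAF (n.toNat + 1) n (d + k) =
      recAF ((strip2 s n k).1.toNat + 1) (strip2 s n k).1 (d + (strip2 s n k).2) ∧
    1 ≤ (strip2 s n k).1 ∧ (strip2 s n k).1 ≤ n ∧
    PySem.Int.mod (strip2 s n k).1 2 = 1 := by
  intro s
  induction s with
  | zero => intro n k d h1 h2; omega
  | succ s ih =>
    intro n k d h1 h2
    unfold strip2
    split
    · rename_i he
      have h2' : n % 2 = 0 := by
        have := PySem.Int.mod_eq_emod_of_pos (a := n) (b := 2) (by norm_num)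
        omega
      have hq : PySem.Int.floordiv n 2 = n / 2 :=
        PySem.Int.floordiv_eq_ediv_of_pos (by norm_num)
      have ihh := ih (PySem.Int.floordiv n 2) (k + 1) d (by rw [hq]; omega)
        (by rw [hq]; rw [pow_succ] at h2; omega)
      refine ⟨?_, ihh.2.1, by rw [hq] at ihh ⊢; omega, ihh.2.2.2⟩
      rw [recAF_succ]
      have hne1 : ¬ n = 1 := by omega
      rw [if_neg hne1, if_pos he]
      have hfe : recAF n.toNat (PySem.Int.floordiv n 2) (d + k + 1) =
          recAF ((PySem.Int.floordiv n 2).toNat + 1) (PySem.Int.floordiv n 2) (d + k + 1) :=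
        recAF_ref n.toNat (PySem.Int.floordiv n 2) (d + k + 1) (by rw [hq]; omega)
          (by rw [hq]; omega)
      rw [hfe]
      have : d + k + 1 = d + (k + 1) := by ring
      rw [this]
      exact ihh.1
    · rename_i ho
      have hm : PySem.Int.mod n 2 = 1 := by
        have := PySem.Int.mod_eq_emod_of_pos (a := n) (b := 2) (by norm_num)
        omega
      exact ⟨rfl, h1, le_refl n, hm⟩

-- main alignment: each iteration of B's loop equals one odd phase of A's recursion
theorem loopBF_eq_recAF : ∀ (f : Nat) (num depth : Int) (acc : List (Int × Int)),
    1 ≤ num → num < 3 ^ 20 → num.toNat < f →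
    loopBF f num depth acc = acc ++ recAF (num.toNat + 1) num depth := by
  intro f
  induction f with
  | zero => intro num depth acc h1 _ hf; omega
  | succ f ih =>
    intro num depth acc h1 h2 hf
    have hs := strip2_recA 64 num 0 depth h1 (by norm_num; omega)
    rw [loopBF_succ]
    set n := (strip2 64 num 0).1 with hn
    set k := (strip2 64 num 0).2 with hk
    have hA : recAF (num.toNat + 1) num depth = recAF (n.toNat + 1) n (depth + k) := by
      have := hs.1; rw [add_zero] at this; exact this
    rcases hs with ⟨_, hn1, hnle, hodd⟩
    by_cases hone : n = 1
    · rw [if_pos hone, hA, hone]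
      rfl
    · rw [if_neg hone]
      have hmag : log3B 32 n 0 = magDownA n 19 := mag_eq n hn1 (by omega)
      have hd := magDownA_spec n hn1 19
      have hle : (3 : Int) ^ magDownA n 19 ≤ n := hd.1
      have hp1 : (1 : Int) ≤ 3 ^ magDownA n 19 := one_le_pow₀ (by norm_num)
      have hA2 : recAF (n.toNat + 1) n (depth + k) =
          (depth + k, (magDownA n 19 : Int)) ::
            (if (3 : Int) ^ magDownA n 19 < n then
              recAF n.toNat (n - 3 ^ magDownA n 19) (depth + k) else []) := by
        rw [recAF_succ, if_neg hone, if_neg (by omega : ¬ PySem.Int.mod n 2 = 0)]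
      rw [hmag]
      by_cases heq : n = (3 : Int) ^ magDownA n 19
      · rw [if_pos heq, hA, hA2, if_neg (by omega)]
      · rw [if_neg heq]
        have hlt : (3 : Int) ^ magDownA n 19 < n := by omega
        have hrec := ih (n - 3 ^ magDownA n 19) (depth + k)
          (acc ++ [(depth + k, (magDownA n 19 : Int))]) (by omega) (by omega) (by omega)
        rw [hrec, hA, hA2, if_pos hlt,
          recAF_ref n.toNat (n - 3 ^ magDownA n 19) (depth + k) (by omega) (by omega)]
        simp

-- ===== VERDICT (by name: the statement is the Claim_ definition above) =====
theorem rec__spec : Claim_equal_rec_ := by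
  intro num depth hdom hpre
  unfold Spec_rec_ rec_ rec__alt
  have hd : num ≤ 2147483648 := by
    unfold Dom_rec_ pvDomInt at hdom
    simp at hdom
    omega
  have := loopBF_eq_recAF (num.toNat + 1) num depth [] hpre (by norm_num; omega) (by omega)
  simpa using this.symm
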